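-- pv_equiv track=rewrite | github.com/steerave/rental-tax-pipeline | src/taxauto/parsers/pm_ltr.py | _split_description_and_category
-- ===== SOURCE A (Python) =====
-- from typing import List, Optional, Sequence
--
-- def _split_description_and_category(
--     middle: str, known_categories: Sequence[str]
-- ) -> Optional[tuple[str, str]]:
--     """Return (description, category) by finding the longest known category
--     that appears at the end of ``middle``. Returns None if nothing matches.
--     """
--     lowered = middle.lower()
--     best: Optional[tuple[str, str]] = None
--     for cat in known_categories:
--         cat_lower = cat.lower()
--         if lowered.endswith(cat_lower):
--             description = middle[: -len(cat)].strip().rstrip("-").strip()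
--             if not description:
--                 continue
--             if best is None or len(cat) > len(best[1]):
--                 best = (description, cat)
--     return best
-- ===== SOURCE B (Python) =====
-- from typing import Optional, Sequence
--
--
-- def _split_description_and_category(
--     middle: str, known_categories: Sequence[str]
-- ) -> Optional[tuple[str, str]]:
--     """Sort categories by length descending (stable) and return at the first
--     one that matches the end of ``middle`` with a non-empty description."""
--     lowered = middle.lower()
--     for cat in sorted(known_categories, key=len, reverse=True):
--         if lowered.endswith(cat.lower()):
--             description = middle[: -len(cat)].strip().rstrip("-").strip()
--             if description:
--                 return (description, cat)
--     return None
-- ===== Notes on version B (the rewrite author's own statement) =====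
-- stated objective: alternative
-- what changed: Replaces the track-the-longest-best scan with a stable sort of the categories by length descending followed by an early return at the first category whose suffix match yields a non-empty description.
import Mathlib
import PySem

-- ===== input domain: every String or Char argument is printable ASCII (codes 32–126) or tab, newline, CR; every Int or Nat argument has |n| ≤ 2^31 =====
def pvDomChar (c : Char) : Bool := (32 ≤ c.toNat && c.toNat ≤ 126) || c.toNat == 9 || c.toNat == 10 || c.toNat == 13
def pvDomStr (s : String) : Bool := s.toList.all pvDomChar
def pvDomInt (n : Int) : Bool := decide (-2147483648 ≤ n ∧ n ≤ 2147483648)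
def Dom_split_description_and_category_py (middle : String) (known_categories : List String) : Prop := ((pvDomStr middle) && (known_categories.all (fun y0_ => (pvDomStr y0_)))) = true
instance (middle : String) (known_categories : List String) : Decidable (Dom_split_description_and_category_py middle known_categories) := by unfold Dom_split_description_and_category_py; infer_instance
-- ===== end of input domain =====

-- B replaces A's track-the-longest-best scan by a stable length-descending sort of the
-- categories with an early return at the first match (alternative decomposition, same cost class).


-- ===== PORT A =====
-- s.rstrip("-") — hand port (PySem has rstrip only for whitespace): drop trailing '-' chars; exact.
def pvRstripDash (cs : List Char) : List Char :=
  (cs.reverse.dropWhile (fun c => c == '-')).reverse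

-- middle[: -len(cat)].strip().rstrip("-").strip()  (shared text of both Pythons)
def pvDesc (middle : List Char) (cat : List Char) : List Char :=
  PySem.Chars.strip (pvRstripDash (PySem.Chars.strip
    (PySem.List.slice middle none (some (-(cat.length : Int))))))

def split_description_and_category_py (middle : String) (known_categories : List String) : Option (String × String) :=
  let lowered := PySem.Chars.lower middle.toList
  let best := known_categories.foldl (fun best cat =>
    let cat_lower := PySem.Chars.lower cat.toList
    if PySem.Chars.endswith lowered cat_lower then
      let description := pvDesc middle.toList cat.toList
      if description.isEmpty then best
      else
        match best with
        | none => some (description, cat)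
        | some b => if b.2.toList.length < cat.toList.length then some (description, cat) else some b
    else best) none
  best.map (fun p => (String.ofList p.1, p.2))

-- ===== PORT B =====
-- the early-return loop over the sorted list
def pvAltFind (middle : List Char) (lowered : List Char) : List String → Option (String × String)
  | [] => none
  | cat :: rest =>
    if PySem.Chars.endswith lowered (PySem.Chars.lower cat.toList) then
      let description := pvDesc middle cat.toList
      if description.isEmpty then pvAltFind middle lowered rest
      else some (String.ofList description, cat)
    else pvAltFind middle lowered rest

def split_description_and_category_py_alt (middle : String) (known_categories : List String) : Option (String × String) :=
  pvAltFind middle.toList (PySem.Chars.lower middle.toList)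
    (PySem.List.sorted known_categories (fun c => c.toList.length) true)

-- ===== PRECONDITION & SPEC =====
def Spec_split_description_and_category_py (middle : String) (known_categories : List String) (out : Option (String × String)) : Prop := out = split_description_and_category_py_alt middle known_categories
instance (middle : String) (known_categories : List String) (out : Option (String × String)) : Decidable (Spec_split_description_and_category_py middle known_categories out) := by unfold Spec_split_description_and_category_py; infer_instance

-- ===== CLAIM (what is proved, stated in full; the proofs are below) =====
def Claim_equal_split_description_and_category_py : Prop := ∀ (middle : String) (known_categories : List String), Dom_split_description_and_category_py middle known_categories → Spec_split_description_and_category_py middle known_categories (split_description_and_category_py middle known_categories)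

-- ===== LEMMAS AND PROOFS =====

-- "cat is a hit": endswith and the stripped description is non-empty
def pvValid (middle : List Char) (lowered : List Char) (cat : String) : Bool :=
  PySem.Chars.endswith lowered (PySem.Chars.lower cat.toList) && !(pvDesc middle cat.toList).isEmpty

-- the abstract first-maximal fold (cat only), mirroring A's best tracking
def pvStep (middle lowered : List Char) (b : Option String) (cat : String) : Option String :=
  if pvValid middle lowered cat then
    match b with
    | none => some cat
    | some m => if m.toList.length < cat.toList.length then some cat else some m
  else b

-- B's loop is find?-then-decorate
theorem pvAltFind_eq_find? (middle lowered : List Char) (l : List String) :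
    pvAltFind middle lowered l =
      (l.find? (pvValid middle lowered)).map
        (fun c => (String.ofList (pvDesc middle c.toList), c)) := by
  induction l with
  | nil => rfl
  | cons c rest ih =>
    simp only [pvAltFind, List.find?_cons, pvValid]
    by_cases he : PySem.Chars.endswith lowered (PySem.Chars.lower c.toList) = true
    · by_cases hd : (pvDesc middle c.toList).isEmpty = true
      · simp [he, hd, ih]
      · simp [he, hd]
    · simp [he, ih]

-- A's fold is the abstract fold decorated with the description
theorem pvFoldA_eq (middle lowered : List Char) (l : List String) (b : Option String) :
    l.foldl (fun best cat =>
      if PySem.Chars.endswith lowered (PySem.Chars.lower cat.toList) then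
        if (pvDesc middle cat.toList).isEmpty then best
        else
          match best with
          | none => some (pvDesc middle cat.toList, cat)
          | some p => if p.2.toList.length < cat.toList.length then some (pvDesc middle cat.toList, cat) else some p
      else best)
      (b.map (fun c => (pvDesc middle c.toList, c)))
    = (l.foldl (pvStep middle lowered) b).map (fun c => (pvDesc middle c.toList, c)) := by
  induction l generalizing b with
  | nil => rfl
  | cons c rest ih =>
    simp only [List.foldl_cons]
    rw [← ih]
    congr 1
    simp only [pvStep, pvValid]
    by_cases he : PySem.Chars.endswith lowered (PySem.Chars.lower c.toList) = true
    · by_cases hd : (pvDesc middle c.toList).isEmpty = true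
      · simp [he, hd]
      · cases b with
        | none => simp [he, hd]
        | some m =>
          by_cases hl : m.length < c.length <;>
            simp [he, hd, hl, String.length_toList]
    · cases b <;> simp [he]

-- key step: inserting x into a length-descending list commutes with find? the way pvStep does
theorem pvFind_insertBy (middle lowered : List Char) (x : String) (s : List String)
    (hs : s.Pairwise (fun a b => b.toList.length ≤ a.toList.length)) :
    (PySem.List.insertBy (fun a b => decide (b.toList.length < a.toList.length)) x s).find?
        (pvValid middle lowered)
      = pvStep middle lowered (s.find? (pvValid middle lowered)) x := by
  induction s with
  | nil =>
    simp only [PySem.List.insertBy, List.find?, pvStep]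
    cases hv : pvValid middle lowered x <;> simp
  | cons y ys ih =>
    rcases List.pairwise_cons.mp hs with ⟨hy, hys⟩
    simp only [PySem.List.insertBy]
    by_cases hk : y.toList.length < x.toList.length
    · -- x goes in front; every element of y::ys has key ≤ key y < key x
      simp only [hk, decide_true, if_true]
      cases hv : pvValid middle lowered x with
      | true =>
        cases hf : (y :: ys).find? (pvValid middle lowered) with
        | none => simp [hv, pvStep]
        | some m =>
          have hm : m ∈ y :: ys := List.mem_of_find?_eq_some hf
          have hmk : m.length < x.length := by
            rcases List.mem_cons.mp hm with h | h
            · subst h; simpa [String.length_toList] using hk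
            · simpa [String.length_toList] using lt_of_le_of_lt (hy m h) hk
          simp [hv, pvStep, hmk, String.length_toList]
      | false =>
        cases hf : (y :: ys).find? (pvValid middle lowered) <;>
          simpa [hv, pvStep] using hf
    · -- x goes after y
      simp only [hk, decide_false, Bool.false_eq_true, if_false]
      cases hvy : pvValid middle lowered y with
      | true =>
        have hyk : ¬ y.length < x.length := by
          simpa [String.length_toList] using hk
        simp [hvy, pvStep, hyk, String.length_toList]
      | false =>
        simp only [List.find?_cons, hvy]
        exact ih hys

-- the heart: first hit of the length-descending stable sort = A's first-maximal fold
theorem pvFind_sorted_eq_fold (middle lowered : List Char) (l : List String) :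
    ((PySem.List.sorted l (fun c => c.toList.length) true).find? (pvValid middle lowered))
      = l.foldl (pvStep middle lowered) none := by
  induction l using List.reverseRecOn with
  | nil => rfl
  | append_singleton l x ih =>
    have hsort : PySem.List.sorted (l ++ [x]) (fun c => c.toList.length) true
        = PySem.List.insertBy (fun a b => decide (b.toList.length < a.toList.length)) x
            (PySem.List.sorted l (fun c => c.toList.length) true) := by
      rw [PySem.List.sorted_rev_eq_foldl_insertBy, PySem.List.sorted_rev_eq_foldl_insertBy,
        List.foldl_append]
      rfl
    rw [hsort, List.foldl_append,
      pvFind_insertBy middle lowered x _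
        (PySem.List.sorted_pairwise_rev l (fun c => c.toList.length)),
      ih]
    rfl

-- ===== VERDICT (by name: the statement is the Claim_ definition above) =====
theorem split_description_and_category_py_spec : Claim_equal_split_description_and_category_py := by
  intro middle known_categories _
  unfold Spec_split_description_and_category_py
  unfold split_description_and_category_py split_description_and_category_py_alt
  rw [pvAltFind_eq_find?, pvFind_sorted_eq_fold]
  have h := pvFoldA_eq middle.toList (PySem.Chars.lower middle.toList) known_categories none
  simp only [Option.map_none] at h
  show Option.map (fun p => (String.ofList p.1, p.2))
      (known_categories.foldl (fun best cat =>
        if PySem.Chars.endswith (PySem.Chars.lower middle.toList) (PySem.Chars.lower cat.toList) then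
          if (pvDesc middle.toList cat.toList).isEmpty then best
          else
            match best with
            | none => some (pvDesc middle.toList cat.toList, cat)
            | some b => if b.2.toList.length < cat.toList.length then
                some (pvDesc middle.toList cat.toList, cat) else some b
        else best) none) = _
  rw [h, Option.map_map]
  rfl
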